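-- pv_equiv track=rewrite | github.com/fineman999/Algorithm | BaekJoon/Silver/Level1/abs_heap.py | solution
-- ===== SOURCE A (Python) =====
-- import heapq
--
-- def solution(N, arr):
--
--     heap_minus = []
--     heap_plus = []
--     answer = []
--     for ele in arr:
--         if ele == 0:
--             check = 0
--             if heap_plus and heap_minus:
--                 check_plus = heapq.heappop(heap_plus)
--                 check_minus = -heapq.heappop(heap_minus)
--
--                 if abs(check_plus) >= abs(check_minus):
--                     check = check_minus
--                     heapq.heappush(heap_plus, check_plus)
--                 else:
--                     check = check_plus
--                     heapq.heappush(heap_minus, -check_minus)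
--             elif heap_plus:
--                 check = heapq.heappop(heap_plus)
--             elif heap_minus:
--                 check = -heapq.heappop(heap_minus)
--             answer.append(check)
--         else:
--             if ele < 0:
--                 heapq.heappush(heap_minus, abs(ele))
--             else:
--                 heapq.heappush(heap_plus, ele)
--
--     return answer
-- ===== SOURCE B (Python) =====
-- import heapq
--
-- def solution(N, arr):
--     heap = []
--     answer = []
--     for ele in arr:
--         if ele == 0:
--             if heap:
--                 answer.append(heapq.heappop(heap)[1])
--             else:
--                 answer.append(0)
--         else:
--             heapq.heappush(heap, (abs(ele), ele))
--     return answer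
-- ===== Notes on version B (the rewrite author's own statement) =====
-- stated objective: simpler
-- what changed: One min-heap of (abs(ele), ele) tuples replaces A's two sign-separated heaps and its pop-compare-push-back arbitration; tuple ordering gives A's negative-first tie-break for free.
import Mathlib
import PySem

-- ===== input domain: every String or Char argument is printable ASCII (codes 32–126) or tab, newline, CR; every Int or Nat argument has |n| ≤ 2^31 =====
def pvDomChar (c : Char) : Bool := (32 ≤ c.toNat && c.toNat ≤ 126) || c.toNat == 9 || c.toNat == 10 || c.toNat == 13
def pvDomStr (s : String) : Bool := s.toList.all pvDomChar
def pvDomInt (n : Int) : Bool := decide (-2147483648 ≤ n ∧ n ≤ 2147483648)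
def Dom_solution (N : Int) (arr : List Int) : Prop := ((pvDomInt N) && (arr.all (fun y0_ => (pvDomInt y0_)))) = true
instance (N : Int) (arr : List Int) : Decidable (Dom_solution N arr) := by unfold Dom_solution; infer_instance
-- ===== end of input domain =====

-- B replaces A's two sign-separated heaps and pop-compare-push-back arbitration by ONE
-- min-heap of (abs(ele), ele) tuples (simpler; same return value; no argument is mutated).

-- ===== PORT A =====
-- heapq on a list of Ints: the observable behaviour of a binary heap of ints is that of a
-- multiset whose pop returns the minimum; push = cons, pop = (minimum, first occurrence erased).
def heappopA (h : List Int) : Int × List Int :=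
  match h.min? with
  | some m => (m, h.erase m)
  | none => (0, h)   -- unreachable: A pops only non-empty heaps

-- one iteration of A's loop; state = (heap_minus, heap_plus, answer)
def stepA (st : List Int × List Int × List Int) (ele : Int) : List Int × List Int × List Int :=
  match st with
  | (hm, hp, ans) =>
    if ele = 0 then
      if hp ≠ [] ∧ hm ≠ [] then
        let cp := (heappopA hp).1
        let hp' := (heappopA hp).2
        let cm := -((heappopA hm).1)
        let hm' := (heappopA hm).2
        if |cp| ≥ |cm| then (hm', cp :: hp', ans ++ [cm])
        else ((-cm) :: hm', hp', ans ++ [cp])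
      else if hp ≠ [] then (hm, (heappopA hp).2, ans ++ [(heappopA hp).1])
      else if hm ≠ [] then ((heappopA hm).2, hp, ans ++ [-((heappopA hm).1)])
      else (hm, hp, ans ++ [0])
    else
      if ele < 0 then (|ele| :: hm, hp, ans)
      else (hm, ele :: hp, ans)

def solution (N : Int) (arr : List Int) : List Int :=
  (arr.foldl stepA ([], [], [])).2.2

-- ===== PORT B =====
def lexLtB (a b : Int × Int) : Bool := a.1 < b.1 || (a.1 == b.1 && a.2 < b.2)

def minPairLoop (m : Int × Int) (xs : List (Int × Int)) : Int × Int :=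
  xs.foldl (fun m y => if lexLtB y m then y else m) m

-- heapq on a list of int pairs under Python's tuple order: pop = (lex-minimum, erased)
def heappopB (h : List (Int × Int)) : (Int × Int) × List (Int × Int) :=
  match h with
  | [] => ((0, 0), h)   -- unreachable: B pops only non-empty heaps
  | x :: xs => ((minPairLoop x xs), h.erase (minPairLoop x xs))

-- one iteration of B's loop; state = (heap, answer)
def stepB (st : List (Int × Int) × List Int) (ele : Int) : List (Int × Int) × List Int :=
  match st with
  | (heap, ans) =>
    if ele = 0 then
      if heap ≠ [] then ((heappopB heap).2, ans ++ [(heappopB heap).1.2])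
      else (heap, ans ++ [0])
    else ((|ele|, ele) :: heap, ans)

def solution_alt (N : Int) (arr : List Int) : List Int :=
  (arr.foldl stepB ([], [])).2

-- ===== PRECONDITION & SPEC =====
def Spec_solution (N : Int) (arr : List Int) (out : List Int) : Prop := out = solution_alt N arr
instance (N : Int) (arr : List Int) (out : List Int) : Decidable (Spec_solution N arr out) := by unfold Spec_solution; infer_instance

-- ===== CLAIM (what is proved, stated in full; the proofs are below) =====
def Claim_equal_solution : Prop := ∀ (N : Int) (arr : List Int), Dom_solution N arr → Spec_solution N arr (solution N arr)

-- ===== LEMMAS AND PROOFS =====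

-- non-strict lexicographic order on pairs
def LexLe (a b : Int × Int) : Prop := a.1 < b.1 ∨ (a.1 = b.1 ∧ a.2 ≤ b.2)

lemma lexLtB_false_iff (a b : Int × Int) : lexLtB a b = false ↔ LexLe b a := by
  simp [lexLtB, LexLe]; omega

lemma lexLe_antisymm {a b : Int × Int} (h1 : LexLe a b) (h2 : LexLe b a) : a = b := by
  obtain ⟨a1, a2⟩ := a; obtain ⟨b1, b2⟩ := b
  simp [LexLe] at h1 h2
  have : a1 = b1 ∧ a2 = b2 := by omega
  simp [this.1, this.2]

lemma minPairLoop_spec : ∀ (xs : List (Int × Int)) (m : Int × Int),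
    minPairLoop m xs ∈ m :: xs ∧ ∀ y ∈ m :: xs, LexLe (minPairLoop m xs) y := by
  intro xs
  induction xs with
  | nil => intro m; simp [minPairLoop, LexLe]
  | cons x xs ih =>
    intro m
    have hred : minPairLoop m (x :: xs) = minPairLoop (if lexLtB x m then x else m) xs := by
      simp [minPairLoop, List.foldl]
    obtain ⟨hmem, hle⟩ := ih (if lexLtB x m then x else m)
    constructor
    · rw [hred]
      rcases List.mem_cons.mp hmem with h | h
      · rw [h]; by_cases hx : lexLtB x m = true <;> simp [hx]
      · simp [h]
    · intro y hy
      rw [hred]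
      have hstep : LexLe (if lexLtB x m then x else m) x ∧ LexLe (if lexLtB x m then x else m) m := by
        by_cases hx : lexLtB x m = true
        · simp [hx]
          constructor
          · exact Or.inr ⟨rfl, le_refl _⟩
          · simp [lexLtB] at hx; simp [LexLe]; omega
        · simp at hx; simp [hx, (lexLtB_false_iff x m).mp hx]
          exact Or.inr ⟨rfl, le_refl _⟩
      have hself : LexLe (minPairLoop (if lexLtB x m then x else m) xs) (if lexLtB x m then x else m) :=
        hle _ (List.mem_cons_self ..)
      have htrans : ∀ {p q r : Int × Int}, LexLe p q → LexLe q r → LexLe p r := by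
        intro p q r h1 h2; simp [LexLe] at *; omega
      rcases List.mem_cons.mp hy with rfl | hy
      · exact htrans hself hstep.2
      · rcases List.mem_cons.mp hy with rfl | hy
        · exact htrans hself hstep.1
        · exact hle _ (List.mem_cons_of_mem _ hy)

-- uniqueness: any member below everything is THE minPairLoop result
lemma minPairLoop_eq {x : Int × Int} {xs : List (Int × Int)} {c : Int × Int}
    (hc : c ∈ x :: xs) (hmin : ∀ y ∈ x :: xs, LexLe c y) : minPairLoop x xs = c := by
  obtain ⟨hmem, hle⟩ := minPairLoop_spec xs x
  exact lexLe_antisymm (hle c hc) (hmin _ hmem)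

lemma heappopB_eq {heap : List (Int × Int)} {c : Int × Int}
    (hc : c ∈ heap) (hmin : ∀ y ∈ heap, LexLe c y) :
    heappopB heap = (c, heap.erase c) := by
  match heap with
  | [] => cases hc
  | x :: xs =>
    have := minPairLoop_eq hc hmin
    simp [heappopB, this]

def dupF : Int → Int × Int := fun p => (p, p)
def negF : Int → Int × Int := fun m => (m, -m)

-- erase commutes with map, up to permutation, at a member's image
lemma erase_map_perm (f : Int → Int × Int) {a : Int} {l : List Int} (ha : a ∈ l) :
    ((l.map f).erase (f a)).Perm ((l.erase a).map f) := by
  have h1 : l.Perm (a :: l.erase a) := List.perm_cons_erase ha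
  have h2 : (l.map f).Perm (f a :: (l.erase a).map f) := by
    simpa using h1.map f
  have h3 : (l.map f).Perm (f a :: (l.map f).erase (f a)) :=
    List.perm_cons_erase (List.mem_map_of_mem ha)
  exact (h3.symm.trans h2).cons_inv

-- the main loop invariant: B's heap is (as a multiset) A's two heaps tagged with their signed values
-- pop of a non-empty plus-only / mixed heap, via uniqueness of the lex minimum
lemma heappopA_of_min {l : List Int} {a : Int} (h : l.min? = some a) :
    heappopA l = (a, l.erase a) := by simp [heappopA, h]

lemma loop_eq : ∀ (rest : List Int) (hm hp : List Int) (heap : List (Int × Int)) (ans : List Int),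
    heap.Perm (hp.map dupF ++ hm.map negF) →
    (∀ p ∈ hp, 0 < p) → (∀ m ∈ hm, 0 < m) →
    (List.foldl stepA (hm, hp, ans) rest).2.2 = (List.foldl stepB (heap, ans) rest).2 := by
  intro rest
  induction rest with
  | nil => intro hm hp heap ans _ _ _; rfl
  | cons ele rest ih =>
    intro hm hp heap ans hperm hppos hmpos
    rw [List.foldl_cons, List.foldl_cons]
    by_cases he : ele = 0
    · subst he
      by_cases hhp : hp = []
      · by_cases hhm : hm = []
        · -- both heaps empty: both append 0
          subst hhp hhm
          have hnil : heap = [] := hperm.eq_nil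
          rw [hnil]
          have h1 : stepA ([], [], ans) 0 = ([], [], ans ++ [0]) := by simp [stepA]
          have h2 : stepB ([], ans) 0 = ([], ans ++ [0]) := by simp [stepB]
          rw [h1, h2]
          exact ih [] [] [] (ans ++ [0]) (by simp) (by simp) (by simp)
        · -- only heap_minus non-empty
          subst hhp
          obtain ⟨pm, hmin⟩ : ∃ a, hm.min? = some a := by
            cases h : hm.min? with
            | none => exact absurd (List.min?_eq_none_iff.mp h) hhm
            | some a => exact ⟨a, rfl⟩
          obtain ⟨hpmem, hple⟩ := List.min?_eq_some_iff.mp hmin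
          have hpmpos : 0 < pm := hmpos _ hpmem
          have h1 : stepA (hm, [], ans) 0 = (hm.erase pm, [], ans ++ [-pm]) := by
            simp [stepA, hhm, heappopA_of_min hmin]
          have hc : ((pm, -pm) : Int × Int) ∈ heap := by
            rw [hperm.mem_iff]
            simp only [List.mem_append, List.mem_map]
            exact Or.inr ⟨pm, hpmem, rfl⟩
          have hcmin : ∀ y ∈ heap, LexLe (pm, -pm) y := by
            intro y hy
            rw [hperm.mem_iff] at hy
            simp only [List.mem_append, List.mem_map] at hy
            rcases hy with ⟨p, hp1, rfl⟩ | ⟨m, hm1, rfl⟩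
            · simp at hp1
            · have := hple _ hm1
              simp only [negF, LexLe]; omega
          have hne : heap ≠ [] := by intro h0; rw [h0] at hc; cases hc
          have h2 : stepB (heap, ans) 0 = (heap.erase (pm, -pm), ans ++ [-pm]) := by
            simp [stepB, hne, heappopB_eq hc hcmin]
          rw [h1, h2]
          apply ih
          · refine (hperm.erase ((pm, -pm) : Int × Int)).trans ?_
            simpa using erase_map_perm negF hpmem
          · simp
          · exact fun m hmx => hmpos _ (List.mem_of_mem_erase hmx)
      · by_cases hhm : hm = []
        · -- only heap_plus non-empty
          subst hhm
          obtain ⟨cp, hmin⟩ : ∃ a, hp.min? = some a := by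
            cases h : hp.min? with
            | none => exact absurd (List.min?_eq_none_iff.mp h) hhp
            | some a => exact ⟨a, rfl⟩
          obtain ⟨hcmem, hcle⟩ := List.min?_eq_some_iff.mp hmin
          have hcppos : 0 < cp := hppos _ hcmem
          have h1 : stepA ([], hp, ans) 0 = ([], hp.erase cp, ans ++ [cp]) := by
            simp [stepA, hhp, heappopA_of_min hmin]
          have hc : ((cp, cp) : Int × Int) ∈ heap := by
            rw [hperm.mem_iff]
            simp only [List.mem_append, List.mem_map]
            exact Or.inl ⟨cp, hcmem, rfl⟩
          have hcmin : ∀ y ∈ heap, LexLe (cp, cp) y := by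
            intro y hy
            rw [hperm.mem_iff] at hy
            simp only [List.mem_append, List.mem_map] at hy
            rcases hy with ⟨p, hp1, rfl⟩ | ⟨m, hm1, rfl⟩
            · have := hcle _ hp1
              simp only [dupF, LexLe]; omega
            · simp at hm1
          have hne : heap ≠ [] := by intro h0; rw [h0] at hc; cases hc
          have h2 : stepB (heap, ans) 0 = (heap.erase (cp, cp), ans ++ [cp]) := by
            simp [stepB, hne, heappopB_eq hc hcmin]
          rw [h1, h2]
          apply ih
          · refine (hperm.erase ((cp, cp) : Int × Int)).trans ?_
            simpa using erase_map_perm dupF hcmem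
          · exact fun p hpx => hppos _ (List.mem_of_mem_erase hpx)
          · simp
        · -- both heaps non-empty: A pops both and compares, B pops the lex minimum
          obtain ⟨cp, hminp⟩ : ∃ a, hp.min? = some a := by
            cases h : hp.min? with
            | none => exact absurd (List.min?_eq_none_iff.mp h) hhp
            | some a => exact ⟨a, rfl⟩
          obtain ⟨pm, hminm⟩ : ∃ a, hm.min? = some a := by
            cases h : hm.min? with
            | none => exact absurd (List.min?_eq_none_iff.mp h) hhm
            | some a => exact ⟨a, rfl⟩
          obtain ⟨hcmem, hcle⟩ := List.min?_eq_some_iff.mp hminp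
          obtain ⟨hpmem, hple⟩ := List.min?_eq_some_iff.mp hminm
          have hcppos : 0 < cp := hppos _ hcmem
          have hpmpos : 0 < pm := hmpos _ hpmem
          have hne : heap ≠ [] := by
            intro h0; rw [h0] at hperm
            have := List.map_eq_nil_iff.mp (List.append_eq_nil_iff.mp hperm.symm.eq_nil).1
            exact hhp this
          have habs : (|cp| ≥ |(-pm)| : Prop) ↔ pm ≤ cp := by
            rw [abs_of_pos hcppos, abs_neg, abs_of_pos hpmpos]
          by_cases hcmp : pm ≤ cp
          · -- tie or plus ≥ minus: the negative value -pm wins in both programs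
            have h1 : stepA (hm, hp, ans) 0 =
                (hm.erase pm, cp :: hp.erase cp, ans ++ [-pm]) := by
              simp only [stepA, heappopA_of_min hminp, heappopA_of_min hminm]
              rw [if_pos trivial, if_pos ⟨hhp, hhm⟩, if_pos (habs.mpr hcmp)]
            have hc : ((pm, -pm) : Int × Int) ∈ heap := by
              rw [hperm.mem_iff]
              simp only [List.mem_append, List.mem_map]
              exact Or.inr ⟨pm, hpmem, rfl⟩
            have hcmin : ∀ y ∈ heap, LexLe (pm, -pm) y := by
              intro y hy
              rw [hperm.mem_iff] at hy
              simp only [List.mem_append, List.mem_map] at hy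
              rcases hy with ⟨p, hp1, rfl⟩ | ⟨m, hm1, rfl⟩
              · have h3 := hcle _ hp1
                have h4 := hppos _ hp1
                simp only [dupF, LexLe]; omega
              · have := hple _ hm1
                simp only [negF, LexLe]; omega
            have h2 : stepB (heap, ans) 0 = (heap.erase (pm, -pm), ans ++ [-pm]) := by
              simp [stepB, hne, heappopB_eq hc hcmin]
            rw [h1, h2]
            apply ih
            · have hnotin : ((pm, -pm) : Int × Int) ∉ hp.map dupF := by
                simp only [List.mem_map, dupF, not_exists]
                rintro p ⟨hp1, hp2⟩
                have h5 := hppos _ hp1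
                rw [Prod.mk.injEq] at hp2
                omega
              refine (hperm.erase ((pm, -pm) : Int × Int)).trans ?_
              rw [List.erase_append_right _ hnotin]
              refine (List.Perm.append_left _ (erase_map_perm negF hpmem)).trans ?_
              exact List.Perm.append_right _
                ((List.perm_cons_erase hcmem).map dupF)
            · intro p hpx
              rcases List.mem_cons.mp hpx with rfl | hpx
              · exact hcppos
              · exact hppos _ (List.mem_of_mem_erase hpx)
            · exact fun m hmx => hmpos _ (List.mem_of_mem_erase hmx)
          · -- plus strictly smaller: cp wins in both programs
            have h1 : stepA (hm, hp, ans) 0 =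
                (pm :: hm.erase pm, hp.erase cp, ans ++ [cp]) := by
              simp only [stepA, heappopA_of_min hminp, heappopA_of_min hminm]
              rw [if_pos trivial, if_pos ⟨hhp, hhm⟩, if_neg (fun h => hcmp (habs.mp h))]
              simp
            have hc : ((cp, cp) : Int × Int) ∈ heap := by
              rw [hperm.mem_iff]
              simp only [List.mem_append, List.mem_map]
              exact Or.inl ⟨cp, hcmem, rfl⟩
            have hcmin : ∀ y ∈ heap, LexLe (cp, cp) y := by
              intro y hy
              rw [hperm.mem_iff] at hy
              simp only [List.mem_append, List.mem_map] at hy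
              rcases hy with ⟨p, hp1, rfl⟩ | ⟨m, hm1, rfl⟩
              · have := hcle _ hp1
                simp only [dupF, LexLe]; omega
              · have := hple _ hm1
                simp only [negF, LexLe]; omega
            have h2 : stepB (heap, ans) 0 = (heap.erase (cp, cp), ans ++ [cp]) := by
              simp [stepB, hne, heappopB_eq hc hcmin]
            rw [h1, h2]
            apply ih
            · have hin : ((cp, cp) : Int × Int) ∈ hp.map dupF :=
                List.mem_map.mpr ⟨cp, hcmem, rfl⟩
              refine (hperm.erase ((cp, cp) : Int × Int)).trans ?_
              rw [List.erase_append_left _ hin]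
              refine (List.Perm.append_right _ (erase_map_perm dupF hcmem)).trans ?_
              exact List.Perm.append_left _ ((List.perm_cons_erase hpmem).map negF)
            · exact fun p hpx => hppos _ (List.mem_of_mem_erase hpx)
            · intro m hmx
              rcases List.mem_cons.mp hmx with rfl | hmx
              · exact hpmpos
              · exact hmpos _ (List.mem_of_mem_erase hmx)
    · -- non-zero element: both programs push
      by_cases hneg : ele < 0
      · have h1 : stepA (hm, hp, ans) ele = (|ele| :: hm, hp, ans) := by
          simp [stepA, he, hneg]
        have h2 : stepB (heap, ans) ele = ((|ele|, ele) :: heap, ans) := by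
          simp [stepB, he]
        rw [h1, h2]
        apply ih
        · have : negF |ele| = (|ele|, ele) := by
            simp [negF, abs_of_neg hneg]
          rw [List.map_cons, this]
          exact (hperm.cons _).trans List.perm_middle.symm
        · exact hppos
        · intro m hmx
          rcases List.mem_cons.mp hmx with rfl | hmx
          · exact abs_pos.mpr he
          · exact hmpos _ hmx
      · have hpos : 0 < ele := by omega
        have h1 : stepA (hm, hp, ans) ele = (hm, ele :: hp, ans) := by
          simp [stepA, he, hneg]
        have h2 : stepB (heap, ans) ele = ((|ele|, ele) :: heap, ans) := by
          simp [stepB, he]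
        rw [h1, h2]
        apply ih
        · have : dupF ele = (|ele|, ele) := by simp [dupF, abs_of_pos hpos]
          rw [List.map_cons, this]
          exact hperm.cons _
        · intro p hpx
          rcases List.mem_cons.mp hpx with rfl | hpx
          · exact hpos
          · exact hppos _ hpx
        · exact hmpos

-- ===== VERDICT (by name: the statement is the Claim_ definition above) =====
theorem solution_spec : Claim_equal_solution := by
  intro N arr _
  unfold Spec_solution solution solution_alt
  exact loop_eq arr [] [] [] [] (by simp) (by simp) (by simp)
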